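-- pv_equiv track=rewrite | github.com/ViniciusOliveiraAndrade/-.CLASS.-CInAulas | IP/Avaliação 2/Tartaruga.py | move_tartaruga
-- ===== SOURCE A (Python) =====
-- def move_tartaruga(matriz,saltos,direita,esquerda,cima,baixo,X,Y,caneta):
-- 	s = saltos
-- 	x = X
-- 	y = Y
-- 	rascunho = matriz
-- 	if esquerda:
-- 		while x > -1 and saltos > 0:
-- 			if not caneta:
-- 				rascunho[y][x] = 1
-- 			saltos -= 1
-- 			x-=1
-- 	elif direita:
-- 		while x < 25 and saltos > 0:
-- 			if not caneta:
-- 				rascunho[y][x] = 1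
-- 			saltos -= 1
-- 			x+=1
-- 	elif cima:
-- 		while y > -1 and saltos > 0:
-- 			if not caneta:
-- 				rascunho[y][x] = 1
-- 			saltos -= 1
-- 			y-=1
-- 	elif baixo:
-- 		while y < 25 and saltos > 0:
-- 			if not caneta:
-- 				rascunho[y][x] = 1
-- 			saltos -= 1
-- 			y+=1
--
-- 	if x < 0:
-- 		x+=1
--
-- 	elif x > 24:
-- 		x-=1
--
-- 	if y < 0:
-- 		y+=1
--
-- 	elif y > 24:
-- 		y-=1
--
-- 	return rascunho,x,y
-- ===== SOURCE B (Python) =====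
-- def move_tartaruga(matriz, saltos, direita, esquerda, cima, baixo, X, Y, caneta):
--     x, y = X, Y
--     if esquerda:
--         n = max(0, min(saltos, X + 1))
--         if not caneta:
--             for c in range(X, X - n, -1):
--                 matriz[Y][c] = 1
--         x = X - n
--     elif direita:
--         n = max(0, min(saltos, 25 - X))
--         if not caneta:
--             for c in range(X, X + n):
--                 matriz[Y][c] = 1
--         x = X + n
--     elif cima:
--         n = max(0, min(saltos, Y + 1))
--         if not caneta:
--             for r in range(Y, Y - n, -1):
--                 matriz[r][X] = 1
--         y = Y - n
--     elif baixo: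
--         n = max(0, min(saltos, 25 - Y))
--         if not caneta:
--             for r in range(Y, Y + n):
--                 matriz[r][X] = 1
--         y = Y + n
--     if x < 0:
--         x += 1
--     elif x > 24:
--         x -= 1
--     if y < 0:
--         y += 1
--     elif y > 24:
--         y -= 1
--     return matriz, x, y
-- ===== Notes on version B (the rewrite author's own statement) =====
-- stated objective: alternative
-- what changed: Replaces A's four step-by-step while loops (decrement position, write one cell per iteration) by a closed-form step count n = min(saltos, distance to the grid edge), a single bulk fill of the traversed index range, and an arithmetic final position; the end-of-function clamp is kept; the interpreted per-step loop bookkeeping disappears.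
import Mathlib
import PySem

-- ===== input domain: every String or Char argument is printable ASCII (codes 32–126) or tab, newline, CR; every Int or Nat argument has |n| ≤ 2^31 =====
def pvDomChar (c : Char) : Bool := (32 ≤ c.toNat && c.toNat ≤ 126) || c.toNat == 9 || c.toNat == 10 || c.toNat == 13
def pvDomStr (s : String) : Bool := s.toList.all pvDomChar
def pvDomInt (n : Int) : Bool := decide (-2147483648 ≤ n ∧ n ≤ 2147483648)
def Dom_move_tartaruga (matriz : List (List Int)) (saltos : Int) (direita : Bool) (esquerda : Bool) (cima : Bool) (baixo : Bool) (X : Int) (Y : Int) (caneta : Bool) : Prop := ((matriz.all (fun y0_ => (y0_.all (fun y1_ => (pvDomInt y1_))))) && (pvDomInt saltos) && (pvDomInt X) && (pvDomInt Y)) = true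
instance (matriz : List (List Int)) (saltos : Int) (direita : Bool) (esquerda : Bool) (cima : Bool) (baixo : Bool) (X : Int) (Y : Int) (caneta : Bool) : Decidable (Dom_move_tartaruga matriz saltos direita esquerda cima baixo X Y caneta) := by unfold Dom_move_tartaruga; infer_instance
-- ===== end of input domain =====

-- B replaces A's four step-by-step while loops by a closed-form step count n = min(saltos, distance to the edge)
-- plus a bulk fill of the traversed cells; objective: alternative (return-value equivalence; A mutates matriz in
-- place and B performs the same mutation in Python).

-- ===== PORT A =====
-- 'rascunho[y][x] = 1' (Python nested index assignment, negative indices wrap); total no-op form,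
-- exact on Pre_ (where every write is in range).
def set2 (m : List (List Int)) (i j : Int) : List (List Int) :=
  match PySem.List.pyGet? m i with
  | some row => PySem.List.pySetD m i (PySem.List.pySetD row j 1)
  | none => m

-- the shared end-of-function clamp of A (B's Python repeats the same lines verbatim)
def clampC (v : Int) : Int := if v < 0 then v + 1 else if v > 24 then v - 1 else v

-- 'while x > -1 and saltos > 0: …; saltos -= 1; x -= 1'; fuel = saltos.toNat bounds the iteration count
def loopEsq : Nat → List (List Int) → Int → Int → Int → Bool → List (List Int) × Int
  | 0, m, _, x, _, _ => (m, x)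
  | f+1, m, s, x, y, caneta =>
    if x > -1 ∧ s > 0 then
      loopEsq f (if caneta then m else set2 m y x) (s-1) (x-1) y caneta
    else (m, x)

def loopDir : Nat → List (List Int) → Int → Int → Int → Bool → List (List Int) × Int
  | 0, m, _, x, _, _ => (m, x)
  | f+1, m, s, x, y, caneta =>
    if x < 25 ∧ s > 0 then
      loopDir f (if caneta then m else set2 m y x) (s-1) (x+1) y caneta
    else (m, x)

def loopCima : Nat → List (List Int) → Int → Int → Int → Bool → List (List Int) × Int
  | 0, m, _, y, _, _ => (m, y)
  | f+1, m, s, y, x, caneta =>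
    if y > -1 ∧ s > 0 then
      loopCima f (if caneta then m else set2 m y x) (s-1) (y-1) x caneta
    else (m, y)

def loopBaixo : Nat → List (List Int) → Int → Int → Int → Bool → List (List Int) × Int
  | 0, m, _, y, _, _ => (m, y)
  | f+1, m, s, y, x, caneta =>
    if y < 25 ∧ s > 0 then
      loopBaixo f (if caneta then m else set2 m y x) (s-1) (y+1) x caneta
    else (m, y)

def move_tartaruga (matriz : List (List Int)) (saltos : Int) (direita : Bool) (esquerda : Bool) (cima : Bool) (baixo : Bool) (X : Int) (Y : Int) (caneta : Bool) : List (List Int) × Int × Int :=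
  let r :=
    if esquerda then
      let p := loopEsq saltos.toNat matriz saltos X Y caneta
      (p.1, p.2, Y)
    else if direita then
      let p := loopDir saltos.toNat matriz saltos X Y caneta
      (p.1, p.2, Y)
    else if cima then
      let p := loopCima saltos.toNat matriz saltos Y X caneta
      (p.1, X, p.2)
    else if baixo then
      let p := loopBaixo saltos.toNat matriz saltos Y X caneta
      (p.1, X, p.2)
    else (matriz, X, Y)
  (r.1, clampC r.2.1, clampC r.2.2)

-- ===== PORT B =====
-- 'for c in range(…): matriz[Y][c] = 1' (row fixed) / 'for r in range(…): matriz[r][X] = 1' (column fixed)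
def fillH (m : List (List Int)) (y : Int) (cols : List Int) : List (List Int) :=
  cols.foldl (fun a c => set2 a y c) m
def fillV (m : List (List Int)) (x : Int) (rows : List Int) : List (List Int) :=
  rows.foldl (fun a r => set2 a r x) m

def move_tartaruga_alt (matriz : List (List Int)) (saltos : Int) (direita : Bool) (esquerda : Bool) (cima : Bool) (baixo : Bool) (X : Int) (Y : Int) (caneta : Bool) : List (List Int) × Int × Int :=
  if esquerda then
    let n := max 0 (min saltos (X + 1))
    let m := if caneta then matriz else fillH matriz Y (PySem.List.pyRange X (X - n) (-1))
    (m, clampC (X - n), clampC Y)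
  else if direita then
    let n := max 0 (min saltos (25 - X))
    let m := if caneta then matriz else fillH matriz Y (PySem.List.pyRange X (X + n) 1)
    (m, clampC (X + n), clampC Y)
  else if cima then
    let n := max 0 (min saltos (Y + 1))
    let m := if caneta then matriz else fillV matriz X (PySem.List.pyRange Y (Y - n) (-1))
    (m, clampC X, clampC (Y - n))
  else if baixo then
    let n := max 0 (min saltos (25 - Y))
    let m := if caneta then matriz else fillV matriz X (PySem.List.pyRange Y (Y + n) 1)
    (m, clampC X, clampC (Y + n))
  else (matriz, clampC X, clampC Y)

-- ===== PRECONDITION & SPEC =====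
-- cell (i, j) can be written by Python: row index i in range (negative wraps) and column j in range of that row
def okCellB (m : List (List Int)) (i j : Int) : Bool :=
  match PySem.List.pyGet? m i with
  | some row => decide (-(row.length : Int) ≤ j ∧ j < (row.length : Int))
  | none => false

-- Pre_ excludes exactly the inputs on which Python A raises an IndexError: the pen is down, a direction
-- fires its loop, and some traversed cell lies outside the (possibly ragged) matriz.
def Pre_move_tartaruga (matriz : List (List Int)) (saltos : Int) (direita : Bool) (esquerda : Bool) (cima : Bool) (baixo : Bool) (X : Int) (Y : Int) (caneta : Bool) : Prop :=
  caneta = false →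
  ( if esquerda then
      (0 < saltos ∧ 0 ≤ X) → okCellB matriz Y X = true
    else if direita then
      (0 < saltos ∧ X < 25) →
        (okCellB matriz Y X = true ∧ okCellB matriz Y (X + min saltos (25 - X) - 1) = true)
    else if cima then
      (0 < saltos ∧ 0 ≤ Y) →
        (∀ r ∈ PySem.List.pyRange (Y - min saltos (Y + 1) + 1) (Y + 1) 1, okCellB matriz r X = true)
    else if baixo then
      (0 < saltos ∧ Y < 25) →
        (∀ r ∈ PySem.List.pyRange Y (Y + min saltos (25 - Y)) 1, okCellB matriz r X = true)
    else True )
instance (matriz : List (List Int)) (saltos : Int) (direita : Bool) (esquerda : Bool) (cima : Bool) (baixo : Bool) (X : Int) (Y : Int) (caneta : Bool) : Decidable (Pre_move_tartaruga matriz saltos direita esquerda cima baixo X Y caneta) := by unfold Pre_move_tartaruga; infer_instance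

def pvWitness_move_tartaruga : List (List Int) × Int × Bool × Bool × Bool × Bool × Int × Int × Bool :=
  ([[0, 0], [0, 0]], 1, true, false, false, false, 0, 0, false)

def Spec_move_tartaruga (matriz : List (List Int)) (saltos : Int) (direita : Bool) (esquerda : Bool) (cima : Bool) (baixo : Bool) (X : Int) (Y : Int) (caneta : Bool) (out : List (List Int) × Int × Int) : Prop := out = move_tartaruga_alt matriz saltos direita esquerda cima baixo X Y caneta
instance (matriz : List (List Int)) (saltos : Int) (direita : Bool) (esquerda : Bool) (cima : Bool) (baixo : Bool) (X : Int) (Y : Int) (caneta : Bool) (out : List (List Int) × Int × Int) : Decidable (Spec_move_tartaruga matriz saltos direita esquerda cima baixo X Y caneta out) := by unfold Spec_move_tartaruga; infer_instance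

-- ===== CLAIM (what is proved, stated in full; the proofs are below) =====
def Claim_equal_move_tartaruga : Prop := ∀ (matriz : List (List Int)) (saltos : Int) (direita : Bool) (esquerda : Bool) (cima : Bool) (baixo : Bool) (X : Int) (Y : Int) (caneta : Bool), Dom_move_tartaruga matriz saltos direita esquerda cima baixo X Y caneta → Pre_move_tartaruga matriz saltos direita esquerda cima baixo X Y caneta → Spec_move_tartaruga matriz saltos direita esquerda cima baixo X Y caneta (move_tartaruga matriz saltos direita esquerda cima baixo X Y caneta)

-- ===== LEMMAS AND PROOFS =====

lemma loopEsq_eq (f : Nat) : ∀ (m : List (List Int)) (s x y : Int) (caneta : Bool), s ≤ (f : Int) →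
    loopEsq f m s x y caneta =
      ((if caneta then m else fillH m y (PySem.List.pyRange x (x - max 0 (min s (x + 1))) (-1))),
        x - max 0 (min s (x + 1))) := by
  induction f with
  | zero =>
    intro m s x y caneta hs
    have hn : max 0 (min s (x + 1)) = 0 := by omega
    simp [loopEsq, hn, fillH, PySem.List.pyRange_neg_one_eq_nil (le_refl x)]
  | succ f ih =>
    intro m s x y caneta hs
    by_cases h : x > -1 ∧ s > 0
    · have hn : max 0 (min s (x + 1)) = min s (x + 1) := by omega
      have hn1 : (1:Int) ≤ min s (x + 1) := by omega
      have hrec := ih (if caneta then m else set2 m y x) (s - 1) (x - 1) y caneta (by push_cast; omega)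
      have hn' : max 0 (min (s - 1) ((x - 1) + 1)) = min s (x + 1) - 1 := by omega
      rw [hn'] at hrec
      have hcons : PySem.List.pyRange x (x - min s (x + 1)) (-1)
          = x :: PySem.List.pyRange (x - 1) (x - min s (x + 1)) (-1) :=
        PySem.List.pyRange_neg_one_cons (by omega)
      simp only [loopEsq, if_pos h, hrec, hn]
      have harg : x - 1 - (min s (x + 1) - 1) = x - min s (x + 1) := by omega
      rw [harg, hcons]
      cases caneta <;> simp [fillH]
    · have hn : max 0 (min s (x + 1)) = 0 := by omega
      simp [loopEsq, if_neg h, hn, fillH, PySem.List.pyRange_neg_one_eq_nil (le_refl x)]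

lemma loopDir_eq (f : Nat) : ∀ (m : List (List Int)) (s x y : Int) (caneta : Bool), s ≤ (f : Int) →
    loopDir f m s x y caneta =
      ((if caneta then m else fillH m y (PySem.List.pyRange x (x + max 0 (min s (25 - x))) 1)),
        x + max 0 (min s (25 - x))) := by
  induction f with
  | zero =>
    intro m s x y caneta hs
    have hn : max 0 (min s (25 - x)) = 0 := by omega
    simp [loopDir, hn, fillH, PySem.List.pyRange_one_eq_nil (le_refl x)]
  | succ f ih =>
    intro m s x y caneta hs
    by_cases h : x < 25 ∧ s > 0
    · have hn : max 0 (min s (25 - x)) = min s (25 - x) := by omega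
      have hrec := ih (if caneta then m else set2 m y x) (s - 1) (x + 1) y caneta (by push_cast; omega)
      have hn' : max 0 (min (s - 1) (25 - (x + 1))) = min s (25 - x) - 1 := by omega
      rw [hn'] at hrec
      have hcons : PySem.List.pyRange x (x + min s (25 - x)) 1
          = x :: PySem.List.pyRange (x + 1) (x + min s (25 - x)) 1 :=
        PySem.List.pyRange_one_cons (by omega)
      simp only [loopDir, if_pos h, hrec, hn]
      have harg : x + 1 + (min s (25 - x) - 1) = x + min s (25 - x) := by omega
      rw [harg, hcons]
      cases caneta <;> simp [fillH]
    · have hn : max 0 (min s (25 - x)) = 0 := by omega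
      simp [loopDir, if_neg h, hn, fillH, PySem.List.pyRange_one_eq_nil (le_refl x)]

lemma loopCima_eq (f : Nat) : ∀ (m : List (List Int)) (s y x : Int) (caneta : Bool), s ≤ (f : Int) →
    loopCima f m s y x caneta =
      ((if caneta then m else fillV m x (PySem.List.pyRange y (y - max 0 (min s (y + 1))) (-1))),
        y - max 0 (min s (y + 1))) := by
  induction f with
  | zero =>
    intro m s y x caneta hs
    have hn : max 0 (min s (y + 1)) = 0 := by omega
    simp [loopCima, hn, fillV, PySem.List.pyRange_neg_one_eq_nil (le_refl y)]
  | succ f ih =>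
    intro m s y x caneta hs
    by_cases h : y > -1 ∧ s > 0
    · have hn : max 0 (min s (y + 1)) = min s (y + 1) := by omega
      have hrec := ih (if caneta then m else set2 m y x) (s - 1) (y - 1) x caneta (by push_cast; omega)
      have hn' : max 0 (min (s - 1) ((y - 1) + 1)) = min s (y + 1) - 1 := by omega
      rw [hn'] at hrec
      have hcons : PySem.List.pyRange y (y - min s (y + 1)) (-1)
          = y :: PySem.List.pyRange (y - 1) (y - min s (y + 1)) (-1) :=
        PySem.List.pyRange_neg_one_cons (by omega)
      simp only [loopCima, if_pos h, hrec, hn]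
      have harg : y - 1 - (min s (y + 1) - 1) = y - min s (y + 1) := by omega
      rw [harg, hcons]
      cases caneta <;> simp [fillV]
    · have hn : max 0 (min s (y + 1)) = 0 := by omega
      simp [loopCima, if_neg h, hn, fillV, PySem.List.pyRange_neg_one_eq_nil (le_refl y)]

lemma loopBaixo_eq (f : Nat) : ∀ (m : List (List Int)) (s y x : Int) (caneta : Bool), s ≤ (f : Int) →
    loopBaixo f m s y x caneta =
      ((if caneta then m else fillV m x (PySem.List.pyRange y (y + max 0 (min s (25 - y))) 1)),
        y + max 0 (min s (25 - y))) := by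
  induction f with
  | zero =>
    intro m s y x caneta hs
    have hn : max 0 (min s (25 - y)) = 0 := by omega
    simp [loopBaixo, hn, fillV, PySem.List.pyRange_one_eq_nil (le_refl y)]
  | succ f ih =>
    intro m s y x caneta hs
    by_cases h : y < 25 ∧ s > 0
    · have hn : max 0 (min s (25 - y)) = min s (25 - y) := by omega
      have hrec := ih (if caneta then m else set2 m y x) (s - 1) (y + 1) x caneta (by push_cast; omega)
      have hn' : max 0 (min (s - 1) (25 - (y + 1))) = min s (25 - y) - 1 := by omega
      rw [hn'] at hrec
      have hcons : PySem.List.pyRange y (y + min s (25 - y)) 1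
          = y :: PySem.List.pyRange (y + 1) (y + min s (25 - y)) 1 :=
        PySem.List.pyRange_one_cons (by omega)
      simp only [loopBaixo, if_pos h, hrec, hn]
      have harg : y + 1 + (min s (25 - y) - 1) = y + min s (25 - y) := by omega
      rw [harg, hcons]
      cases caneta <;> simp [fillV]
    · have hn : max 0 (min s (25 - y)) = 0 := by omega
      simp [loopBaixo, if_neg h, hn, fillV, PySem.List.pyRange_one_eq_nil (le_refl y)]

-- ===== VERDICT (by name: the statement is the Claim_ definition above) =====
theorem move_tartaruga_spec : Claim_equal_move_tartaruga := by
  intro matriz saltos direita esquerda cima baixo X Y caneta _ _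
  unfold Spec_move_tartaruga move_tartaruga move_tartaruga_alt
  have hs : saltos ≤ (saltos.toNat : Int) := Int.self_le_toNat saltos
  cases esquerda
  · cases direita
    · cases cima
      · cases baixo
        · simp
        · simp [loopBaixo_eq saltos.toNat matriz saltos Y X caneta hs]
      · simp [loopCima_eq saltos.toNat matriz saltos Y X caneta hs]
    · simp [loopDir_eq saltos.toNat matriz saltos X Y caneta hs]
  · simp [loopEsq_eq saltos.toNat matriz saltos X Y caneta hs]
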